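-- pv_equiv track=rewrite | github.com/mahipriyadarshi/LEETCODE | ques10.py | smoothen
-- ===== SOURCE A (Python) =====
-- def smoothen(img,x,y):
--     m,n=len(img),len(img[0])
--     Sum,Count=0,0
--     for i in range(-1,2):
--         for j in range(-1,2):
--             nx,ny=x+i,y+j
--             if 0<=nx<m and 0 <=ny <n:
--                 Sum+=img[nx][ny]
--                 Count+=1
--     return Sum//Count
-- ===== SOURCE B (Python) =====
-- def smoothen(img, x, y):
--     m, n = len(img), len(img[0])
--     x0, x1 = max(0, x - 1), min(m, x + 2)
--     y0, y1 = max(0, y - 1), min(n, y + 2)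
--     total = 0
--     for row in img[x0:x1]:
--         pre = [0]
--         for v in row:
--             pre.append(pre[-1] + v)
--         total += pre[y1] - pre[y0]
--     return total // ((x1 - x0) * (y1 - y0))
-- ===== Notes on version B (the rewrite author's own statement) =====
-- stated objective: alternative
-- what changed: B slices out the clamped window rows and, for each, builds a running prefix-sum array, obtaining the row's window sum as a difference of two prefix sums pre[y1]-pre[y0] and dividing by the closed-form window size, instead of A's nested range(-1,2) offset loops with a per-cell bounds test and an explicit counter.
import Mathlib
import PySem

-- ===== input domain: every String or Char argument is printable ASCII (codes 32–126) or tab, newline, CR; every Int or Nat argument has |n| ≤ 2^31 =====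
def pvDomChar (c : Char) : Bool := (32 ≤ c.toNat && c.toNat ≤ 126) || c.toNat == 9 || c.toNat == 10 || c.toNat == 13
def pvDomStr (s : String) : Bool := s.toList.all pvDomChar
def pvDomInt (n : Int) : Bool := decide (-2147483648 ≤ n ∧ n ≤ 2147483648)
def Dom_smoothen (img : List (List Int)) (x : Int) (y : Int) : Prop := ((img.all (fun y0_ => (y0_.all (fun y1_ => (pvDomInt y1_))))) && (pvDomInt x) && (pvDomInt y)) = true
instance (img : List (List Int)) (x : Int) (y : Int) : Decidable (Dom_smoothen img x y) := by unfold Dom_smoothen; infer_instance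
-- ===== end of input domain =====

-- B slices out the clamped window rows and obtains each row's window sum as a difference of
-- two running prefix sums (pre[y1]-pre[y0]), dividing by the closed-form window size, instead
-- of A's nested range(-1,2) offset loops with a per-cell bounds test and a counter.
-- Neither program mutates its arguments.

-- ===== PORT A =====
def smoothen (img : List (List Int)) (x : Int) (y : Int) : Int :=
  let m : Int := img.length
  -- img[0]: IndexError on empty img is excluded by Pre_ (pyGetD default is never read inside Pre_)
  let n : Int := (PySem.List.pyGetD img 0 []).length
  let sc : Int × Int := (PySem.List.pyRange (-1) 2 1).foldl (fun sc i =>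
    (PySem.List.pyRange (-1) 2 1).foldl (fun sc j =>
      if 0 ≤ x + i ∧ x + i < m ∧ 0 ≤ y + j ∧ y + j < n then
        (sc.1 + PySem.List.pyGetD (PySem.List.pyGetD img (x + i) []) (y + j) 0, sc.2 + 1)
      else sc) sc) ((0 : Int), (0 : Int))
  -- ZeroDivisionError (Count = 0) is excluded by Pre_; ragged rows making img[nx][ny]
  -- an IndexError are excluded by Pre_ as well.
  PySem.Int.floordiv sc.1 sc.2

-- ===== PORT B =====
def smoothen_alt (img : List (List Int)) (x : Int) (y : Int) : Int :=
  let m : Int := img.length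
  let n : Int := (PySem.List.pyGetD img 0 []).length
  let x0 := max 0 (x - 1)
  let x1 := min m (x + 2)
  let y0 := max 0 (y - 1)
  let y1 := min n (y + 2)
  let total := (PySem.List.slice img (some x0) (some x1)).foldl (fun acc row =>
      let pre := row.foldl (fun pre v => pre ++ [PySem.List.pyGetD pre (-1) 0 + v]) [(0 : Int)]
      acc + (PySem.List.pyGetD pre y1 0 - PySem.List.pyGetD pre y0 0)) 0
  PySem.Int.floordiv total ((x1 - x0) * (y1 - y0))

-- ===== PRECONDITION & SPEC =====
-- Pre_ is exactly the set of inputs on which the Python A returns normally: a nonempty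
-- image with a nonempty first row, the point inside the grid extended by one in each
-- direction (otherwise Count = 0 and A raises ZeroDivisionError), and every row met by
-- the window long enough for the accessed columns (otherwise IndexError on ragged rows).
def Pre_smoothen (img : List (List Int)) (x : Int) (y : Int) : Prop :=
  img ≠ [] ∧
  1 ≤ ((img.getD 0 []).length : Int) ∧
  -1 ≤ x ∧ x ≤ (img.length : Int) ∧
  -1 ≤ y ∧ y ≤ ((img.getD 0 []).length : Int) ∧
  ∀ i ∈ List.range img.length, (x - 1 ≤ (i : Int) ∧ (i : Int) ≤ x + 1) →
    min ((img.getD 0 []).length : Int) (y + 2) ≤ ((img.getD i []).length : Int)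
instance (img : List (List Int)) (x : Int) (y : Int) : Decidable (Pre_smoothen img x y) := by
  unfold Pre_smoothen; infer_instance

def pvWitness_smoothen : List (List Int) × Int × Int := ([[1, 2, 3], [4, 5, 6], [7, 8, 9]], 1, 1)

def Spec_smoothen (img : List (List Int)) (x : Int) (y : Int) (out : Int) : Prop := out = smoothen_alt img x y
instance (img : List (List Int)) (x : Int) (y : Int) (out : Int) : Decidable (Spec_smoothen img x y out) := by unfold Spec_smoothen; infer_instance

-- ===== CLAIM (what is proved, stated in full; the proofs are below) =====
def Claim_equal_smoothen : Prop := ∀ (img : List (List Int)) (x : Int) (y : Int), Dom_smoothen img x y → Pre_smoothen img x y → Spec_smoothen img x y (smoothen img x y)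

-- ===== LEMMAS AND PROOFS =====

def wsum (row : List Int) (a l : Nat) : Int := ((List.range l).map (fun k => row.getD (a + k) 0)).sum

lemma wsum_one (row : List Int) (a : Nat) : wsum row a 1 = row.getD (a + 0) 0 := by
  simp [wsum]

lemma wsum_two (row : List Int) (a : Nat) :
    wsum row a 2 = row.getD (a + 0) 0 + row.getD (a + 1) 0 := by
  simp [wsum, List.range_succ]

lemma wsum_three (row : List Int) (a : Nat) :
    wsum row a 3 = row.getD (a + 0) 0 + row.getD (a + 1) 0 + row.getD (a + 2) 0 := by
  simp [wsum, List.range_succ]; ring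

-- the B-side total of the old-style clamped-range formulation; A is first proved equal to
-- this intermediate, then the intermediate equal to B's prefix-sum port
def bAux (img : List (List Int)) (x : Int) (y : Int) : Int :=
  let m : Int := img.length
  let n : Int := (PySem.List.pyGetD img 0 []).length
  let x0 := max 0 (x - 1)
  let y0 := max 0 (y - 1)
  let x1 := min m (x + 2)
  let y1 := min n (y + 2)
  let total := ((PySem.List.pyRange x0 x1 1).map (fun i =>
      ((PySem.List.pyRange y0 y1 1).map (fun j =>
        PySem.List.pyGetD (PySem.List.pyGetD img i []) j 0)).sum)).sum
  PySem.Int.floordiv total ((max 0 (x1 - x0)) * (max 0 (y1 - y0)))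

lemma inner_eq (row : List Int) (c d : Int) (hc : 0 ≤ c) :
    ((PySem.List.pyRange c d 1).map (fun j => PySem.List.pyGetD row j 0)).sum
    = wsum row c.toNat (d - c).toNat := by
  rw [PySem.List.pyRange_one, List.map_map]
  unfold wsum
  refine congrArg List.sum (List.map_congr_left ?_)
  intro k _
  simp only [Function.comp_apply]
  rw [PySem.List.pyGetD_of_nonneg row 0 (by omega), show (c + (k : Int)).toNat = c.toNat + k by omega]

lemma outer_eq (img : List (List Int)) (a b c d : Int) (h0 : 0 ≤ a) :
    ((PySem.List.pyRange a b 1).map (fun i =>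
        ((PySem.List.pyRange c d 1).map (fun j =>
          PySem.List.pyGetD (PySem.List.pyGetD img i []) j 0)).sum)).sum
    = ((List.range (b - a).toNat).map (fun k =>
        ((PySem.List.pyRange c d 1).map (fun j =>
          PySem.List.pyGetD (img.getD (a.toNat + k) []) j 0)).sum)).sum := by
  rw [PySem.List.pyRange_one a b, List.map_map]
  refine congrArg List.sum (List.map_congr_left ?_)
  intro k _
  simp only [Function.comp_apply]
  rw [PySem.List.pyGetD_of_nonneg img [] (by omega), show (a + (k : Int)).toNat = a.toNat + k by omega]

lemma innerEval (row : List Int) (n y : Int) (P1 P2 : Prop) [Decidable P1] [Decidable P2]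
    (hP1 : P1) (hP2 : P2) (hn : 1 ≤ n) (hy1 : -1 ≤ y) (hy2 : y ≤ n)
    (sc : Int × Int) :
    List.foldl (fun sc j => if P1 ∧ P2 ∧ 0 ≤ y + j ∧ y + j < n then
        (sc.1 + PySem.List.pyGetD row (y + j) 0, sc.2 + 1) else sc) sc [(-1 : Int), 0, 1]
    = (sc.1 + wsum row (max 0 (y - 1)).toNat (min n (y + 2) - max 0 (y - 1)).toNat,
       sc.2 + (min n (y + 2) - max 0 (y - 1))) := by
  simp only [List.foldl_cons, List.foldl_nil]
  by_cases h1 : 1 ≤ y <;> by_cases h2 : y + 2 ≤ n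
  · -- full window [y-1, y+2)
    rw [if_pos ⟨hP1, hP2, by omega, by omega⟩, if_pos ⟨hP1, hP2, by omega, by omega⟩,
        if_pos ⟨hP1, hP2, by omega, by omega⟩]
    rw [show max 0 (y - 1) = y - 1 by omega, show min n (y + 2) = y + 2 by omega,
        show (y + 2 - (y - 1)).toNat = 3 by omega, wsum_three,
        PySem.List.pyGetD_of_nonneg row 0 (by omega), PySem.List.pyGetD_of_nonneg row 0 (by omega),
        PySem.List.pyGetD_of_nonneg row 0 (by omega),
        show (y + -1).toNat = (y - 1).toNat + 0 by omega,
        show (y + 0).toNat = (y - 1).toNat + 1 by omega,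
        show (y + 1).toNat = (y - 1).toNat + 2 by omega]
    refine Prod.ext ?_ ?_ <;> simp <;> omega
  · -- right clamp: window [y-1, n)
    have hcase : y = n ∨ y + 1 = n := by omega
    rcases hcase with h | h
    · rw [if_neg (by rintro ⟨-, -, h3, h4⟩; omega), if_neg (by rintro ⟨-, -, h3, h4⟩; omega),
          if_pos ⟨hP1, hP2, by omega, by omega⟩]
      rw [show max 0 (y - 1) = y - 1 by omega, show min n (y + 2) = n by omega,
          show (n - (y - 1)).toNat = 1 by omega, wsum_one,
          PySem.List.pyGetD_of_nonneg row 0 (by omega),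
          show (y + -1).toNat = (y - 1).toNat + 0 by omega]
      refine Prod.ext ?_ ?_ <;> simp <;> omega
    · rw [if_neg (by rintro ⟨-, -, h3, h4⟩; omega), if_pos ⟨hP1, hP2, by omega, by omega⟩,
          if_pos ⟨hP1, hP2, by omega, by omega⟩]
      rw [show max 0 (y - 1) = y - 1 by omega, show min n (y + 2) = n by omega,
          show (n - (y - 1)).toNat = 2 by omega, wsum_two,
          PySem.List.pyGetD_of_nonneg row 0 (by omega), PySem.List.pyGetD_of_nonneg row 0 (by omega),
          show (y + -1).toNat = (y - 1).toNat + 0 by omega,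
          show (y + 0).toNat = (y - 1).toNat + 1 by omega]
      refine Prod.ext ?_ ?_ <;> simp <;> omega
  · -- left clamp: window [0, y+2)
    have hcase : y = -1 ∨ y = 0 := by omega
    rcases hcase with h | h
    · rw [if_pos ⟨hP1, hP2, by omega, by omega⟩, if_neg (by rintro ⟨-, -, h3, h4⟩; omega),
          if_neg (by rintro ⟨-, -, h3, h4⟩; omega)]
      rw [show max 0 (y - 1) = 0 by omega, show min n (y + 2) = y + 2 by omega,
          show (y + 2 - 0).toNat = 1 by omega, wsum_one,
          PySem.List.pyGetD_of_nonneg row 0 (by omega),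
          show (y + 1).toNat = (0 : Int).toNat + 0 by omega]
      refine Prod.ext ?_ ?_ <;> simp <;> omega
    · rw [if_pos ⟨hP1, hP2, by omega, by omega⟩, if_pos ⟨hP1, hP2, by omega, by omega⟩,
          if_neg (by rintro ⟨-, -, h3, h4⟩; omega)]
      rw [show max 0 (y - 1) = 0 by omega, show min n (y + 2) = y + 2 by omega,
          show (y + 2 - 0).toNat = 2 by omega, wsum_two,
          PySem.List.pyGetD_of_nonneg row 0 (by omega), PySem.List.pyGetD_of_nonneg row 0 (by omega),
          show (y + 0).toNat = (0 : Int).toNat + 0 by omega,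
          show (y + 1).toNat = (0 : Int).toNat + 1 by omega]
      refine Prod.ext ?_ ?_ <;> simp <;> omega
  · -- y = 0, n = 1: window [0, 1)
    rw [if_neg (by rintro ⟨-, -, h3, h4⟩; omega), if_pos ⟨hP1, hP2, by omega, by omega⟩,
        if_neg (by rintro ⟨-, -, h3, h4⟩; omega)]
    rw [show max 0 (y - 1) = 0 by omega, show min n (y + 2) = min n (y + 2) from rfl]
    rw [show min n (y + 2) = n by omega, show (n - 0).toNat = 1 by omega, wsum_one,
        PySem.List.pyGetD_of_nonneg row 0 (by omega),
        show (y + 0).toNat = (0 : Int).toNat + 0 by omega]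
    refine Prod.ext ?_ ?_ <;> simp <;> omega

lemma innerSkip (row : List Int) (n y : Int) (P1 P2 : Prop) [Decidable P1] [Decidable P2]
    (h : ¬(P1 ∧ P2)) (sc : Int × Int) :
    List.foldl (fun sc j => if P1 ∧ P2 ∧ 0 ≤ y + j ∧ y + j < n then
        (sc.1 + PySem.List.pyGetD row (y + j) 0, sc.2 + 1) else sc) sc [(-1 : Int), 0, 1] = sc := by
  simp only [List.foldl_cons, List.foldl_nil]
  rw [if_neg (by tauto), if_neg (by tauto), if_neg (by tauto)]

lemma pyR : PySem.List.pyRange (-1) 2 1 = [(-1 : Int), 0, 1] := by decide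

lemma foldl3 {α β : Type} (f : β → α → β) (i : β) (a b c : α) :
    List.foldl f i [a, b, c] = f (f (f i a) b) c := rfl

theorem smoothen_eq_bAux (img : List (List Int)) (x : Int) (y : Int)
    (hpre : Pre_smoothen img x y) : smoothen img x y = bAux img x y := by
  obtain ⟨hne, hn1, hx1, hx2, hy1, hy2, -⟩ := hpre
  have hn0 : PySem.List.pyGetD img 0 ([] : List Int) = img.getD 0 [] := by
    simpa using PySem.List.pyGetD_of_nonneg img ([] : List Int) (by omega)
  have hmaxd : max 0 (min ((img.getD 0 []).length : Int) (y + 2) - max 0 (y - 1))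
      = min ((img.getD 0 []).length : Int) (y + 2) - max 0 (y - 1) := by omega
  unfold smoothen bAux
  simp only [pyR, hn0]
  rw [foldl3]
  by_cases gx1 : 1 ≤ x <;> by_cases gx2 : x + 2 ≤ (img.length : Int)
  · -- three valid rows x-1, x, x+1
    rw [innerEval _ _ y (0 ≤ x + 1) (x + 1 < (img.length : Int)) (by omega) (by omega) (by omega) hy1 hy2,
        innerEval _ _ y (0 ≤ x + 0) (x + 0 < (img.length : Int)) (by omega) (by omega) (by omega) hy1 hy2,
        innerEval _ _ y (0 ≤ x + -1) (x + -1 < (img.length : Int)) (by omega) (by omega) (by omega) hy1 hy2]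
    rw [show max 0 (x - 1) = x - 1 by omega, show min (img.length : Int) (x + 2) = x + 2 by omega]
    rw [outer_eq img (x - 1) (x + 2) _ _ (by omega),
        show ((x + 2) - (x - 1)).toNat = 3 by omega]
    simp only [List.range_succ, List.range_zero, List.map_append, List.map_cons, List.map_nil,
      List.nil_append, List.sum_append, List.sum_cons, List.sum_nil]
    rw [inner_eq _ _ _ (by omega),
        inner_eq _ _ _ (by omega),
        inner_eq _ _ _ (by omega)]
    rw [PySem.List.pyGetD_of_nonneg img [] (show (0 : Int) ≤ x + -1 by omega),
        PySem.List.pyGetD_of_nonneg img [] (show (0 : Int) ≤ x + 0 by omega),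
        PySem.List.pyGetD_of_nonneg img [] (show (0 : Int) ≤ x + 1 by omega),
        show (x + -1).toNat = (x - 1).toNat + 0 by omega,
        show (x + 0).toNat = (x - 1).toNat + 1 by omega,
        show (x + 1).toNat = (x - 1).toNat + 2 by omega]
    congr 1
    · ring
    · rw [hmaxd, show max 0 ((x + 2) - (x - 1)) = (3 : Int) by omega]; ring
  · -- right clamp on rows
    have hcase : x = (img.length : Int) ∨ x + 1 = (img.length : Int) := by omega
    rcases hcase with hc | hc
    · -- x = len(img): only row x-1
      rw [innerSkip _ _ y (0 ≤ x + 1) (x + 1 < (img.length : Int)) (by rintro ⟨h1, h2⟩; omega),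
          innerSkip _ _ y (0 ≤ x + 0) (x + 0 < (img.length : Int)) (by rintro ⟨h1, h2⟩; omega),
          innerEval _ _ y (0 ≤ x + -1) (x + -1 < (img.length : Int)) (by omega) (by omega) (by omega) hy1 hy2]
      rw [show max 0 (x - 1) = x - 1 by omega, show min (img.length : Int) (x + 2) = (img.length : Int) by omega]
      rw [outer_eq img (x - 1) ((img.length : Int)) _ _ (by omega),
          show (((img.length : Int)) - (x - 1)).toNat = 1 by omega]
      simp only [List.range_succ, List.range_zero, List.map_append, List.map_cons, List.map_nil,
        List.nil_append, List.sum_append, List.sum_cons, List.sum_nil]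
      rw [inner_eq _ _ _ (by omega)]
      rw [PySem.List.pyGetD_of_nonneg img [] (show (0 : Int) ≤ x + -1 by omega),
          show (x + -1).toNat = (x - 1 : Int).toNat + 0 by omega]
      congr 1
      · ring
      · rw [hmaxd, show max 0 (((img.length : Int)) - (x - 1)) = (1 : Int) by omega]; ring
    · -- x + 1 = len(img): rows x-1, x
      rw [innerSkip _ _ y (0 ≤ x + 1) (x + 1 < (img.length : Int)) (by rintro ⟨h1, h2⟩; omega),
          innerEval _ _ y (0 ≤ x + 0) (x + 0 < (img.length : Int)) (by omega) (by omega) (by omega) hy1 hy2,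
          innerEval _ _ y (0 ≤ x + -1) (x + -1 < (img.length : Int)) (by omega) (by omega) (by omega) hy1 hy2]
      rw [show max 0 (x - 1) = x - 1 by omega, show min (img.length : Int) (x + 2) = (img.length : Int) by omega]
      rw [outer_eq img (x - 1) ((img.length : Int)) _ _ (by omega),
          show (((img.length : Int)) - (x - 1)).toNat = 2 by omega]
      simp only [List.range_succ, List.range_zero, List.map_append, List.map_cons, List.map_nil,
        List.nil_append, List.sum_append, List.sum_cons, List.sum_nil]
      rw [inner_eq _ _ _ (by omega),
          inner_eq _ _ _ (by omega)]
      rw [PySem.List.pyGetD_of_nonneg img [] (show (0 : Int) ≤ x + -1 by omega),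
          PySem.List.pyGetD_of_nonneg img [] (show (0 : Int) ≤ x + 0 by omega),
          show (x + -1).toNat = (x - 1 : Int).toNat + 0 by omega,
          show (x + 0).toNat = (x - 1 : Int).toNat + 1 by omega]
      congr 1
      · ring
      · rw [hmaxd, show max 0 (((img.length : Int)) - (x - 1)) = (2 : Int) by omega]; ring
  · -- left clamp on rows
    have hcase : x = -1 ∨ x = 0 := by omega
    rcases hcase with hc | hc
    · -- x = -1: only row 0
      rw [innerEval _ _ y (0 ≤ x + 1) (x + 1 < (img.length : Int)) (by omega) (by omega) (by omega) hy1 hy2,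
          innerSkip _ _ y (0 ≤ x + 0) (x + 0 < (img.length : Int)) (by rintro ⟨h1, h2⟩; omega),
          innerSkip _ _ y (0 ≤ x + -1) (x + -1 < (img.length : Int)) (by rintro ⟨h1, h2⟩; omega)]
      rw [show max 0 (x - 1) = 0 by omega, show min (img.length : Int) (x + 2) = x + 2 by omega]
      rw [outer_eq img (0) (x + 2) _ _ (by omega),
          show ((x + 2) - (0)).toNat = 1 by omega]
      simp only [List.range_succ, List.range_zero, List.map_append, List.map_cons, List.map_nil,
        List.nil_append, List.sum_append, List.sum_cons, List.sum_nil]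
      rw [inner_eq _ _ _ (by omega)]
      rw [PySem.List.pyGetD_of_nonneg img [] (show (0 : Int) ≤ x + 1 by omega),
          show (x + 1).toNat = (0 : Int).toNat + 0 by omega]
      congr 1
      · ring
      · rw [hmaxd, show max 0 ((x + 2) - (0)) = (1 : Int) by omega]; ring
    · -- x = 0: rows 0, 1
      rw [innerEval _ _ y (0 ≤ x + 1) (x + 1 < (img.length : Int)) (by omega) (by omega) (by omega) hy1 hy2,
          innerEval _ _ y (0 ≤ x + 0) (x + 0 < (img.length : Int)) (by omega) (by omega) (by omega) hy1 hy2,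
          innerSkip _ _ y (0 ≤ x + -1) (x + -1 < (img.length : Int)) (by rintro ⟨h1, h2⟩; omega)]
      rw [show max 0 (x - 1) = 0 by omega, show min (img.length : Int) (x + 2) = x + 2 by omega]
      rw [outer_eq img (0) (x + 2) _ _ (by omega),
          show ((x + 2) - (0)).toNat = 2 by omega]
      simp only [List.range_succ, List.range_zero, List.map_append, List.map_cons, List.map_nil,
        List.nil_append, List.sum_append, List.sum_cons, List.sum_nil]
      rw [inner_eq _ _ _ (by omega),
          inner_eq _ _ _ (by omega)]
      rw [PySem.List.pyGetD_of_nonneg img [] (show (0 : Int) ≤ x + 0 by omega),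
          PySem.List.pyGetD_of_nonneg img [] (show (0 : Int) ≤ x + 1 by omega),
          show (x + 0).toNat = (0 : Int).toNat + 0 by omega,
          show (x + 1).toNat = (0 : Int).toNat + 1 by omega]
      congr 1
      · ring
      · rw [hmaxd, show max 0 ((x + 2) - (0)) = (2 : Int) by omega]; ring
  · -- x = 0, len(img) = 1: only row 0
    have hm1 : 1 ≤ (img.length : Int) := by
      have := List.length_pos_iff.mpr hne; omega
    have hx0 : x = 0 := by omega
    have hm : (img.length : Int) = 1 := by omega
    rw [innerSkip _ _ y (0 ≤ x + 1) (x + 1 < (img.length : Int)) (by rintro ⟨h1, h2⟩; omega),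
        innerEval _ _ y (0 ≤ x + 0) (x + 0 < (img.length : Int)) (by omega) (by omega) (by omega) hy1 hy2,
        innerSkip _ _ y (0 ≤ x + -1) (x + -1 < (img.length : Int)) (by rintro ⟨h1, h2⟩; omega)]
    rw [show max 0 (x - 1) = 0 by omega, show min (img.length : Int) (x + 2) = (img.length : Int) by omega]
    rw [outer_eq img (0) ((img.length : Int)) _ _ (by omega),
        show (((img.length : Int)) - (0)).toNat = 1 by omega]
    simp only [List.range_succ, List.range_zero, List.map_append, List.map_cons, List.map_nil,
      List.nil_append, List.sum_append, List.sum_cons, List.sum_nil]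
    rw [inner_eq _ _ _ (by omega)]
    rw [PySem.List.pyGetD_of_nonneg img [] (show (0 : Int) ≤ x + 0 by omega),
        show (x + 0).toNat = (0 : Int).toNat + 0 by omega]
    congr 1
    · ring
    · rw [hmaxd, show max 0 (((img.length : Int)) - (0)) = (1 : Int) by omega]; ring

-- ---- B side: characterising the prefix-sum loop ----

lemma preFold (l : List Int) : ∀ (s0 : List Int) (s : Int),
    l.foldl (fun pre v => pre ++ [PySem.List.pyGetD pre (-1) 0 + v]) (s0 ++ [s])
    = (s0 ++ [s]) ++ (List.range l.length).map (fun k => s + (l.take (k + 1)).sum) := by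
  induction l with
  | nil => intro s0 s; simp
  | cons v l ih =>
    intro s0 s
    simp only [List.foldl_cons, PySem.List.pyGetD_neg_one_append_singleton]
    rw [ih (s0 ++ [s]) (s + v)]
    simp only [List.length_cons, List.range_succ_eq_map, List.map_cons, List.map_map,
      List.take_succ_cons, List.sum_cons, List.take_zero, List.sum_nil, List.append_assoc,
      List.cons_append, List.nil_append]
    have hv : s + (v + 0) = s + v := by ring
    rw [hv]
    refine congrArg _ (congrArg (List.cons s) (congrArg (List.cons (s + v)) ?_))
    refine List.map_congr_left ?_
    intro k _
    simp only [Function.comp_apply]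
    ring

lemma preGet (row : List Int) (k : Nat) (hk : k ≤ row.length) :
    PySem.List.pyGetD (row.foldl (fun pre v => pre ++ [PySem.List.pyGetD pre (-1) 0 + v])
      [(0 : Int)]) (k : Int) 0 = (row.take k).sum := by
  have h := preFold row [] 0
  simp only [List.nil_append] at h
  rw [h, PySem.List.pyGetD_natCast]
  cases k with
  | zero => simp
  | succ j =>
    simp only [List.cons_append, List.getD_cons_succ]
    rw [List.getD_eq_getElem _ 0 (by simpa using Nat.lt_of_succ_le hk)]
    simp

lemma sum_take_add (row : List Int) (a : Nat) :
    ∀ (l : Nat), a + l ≤ row.length → (row.take (a + l)).sum = (row.take a).sum + wsum row a l := by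
  intro l
  induction l with
  | zero => intro _; simp [wsum]
  | succ j ih =>
    intro h
    rw [show a + (j + 1) = (a + j) + 1 from rfl,
        List.sum_take_succ _ _ (by omega)]
    rw [ih (by omega)]
    unfold wsum
    rw [List.range_succ]
    simp only [List.map_append, List.map_cons, List.map_nil, List.sum_append, List.sum_cons,
      List.sum_nil, add_zero]
    rw [List.getD_eq_getElem _ 0 (by omega)]
    ring

lemma rowWindow (row : List Int) (a b : Nat) (hab : a ≤ b) (hb : b ≤ row.length) :
    (row.take b).sum - (row.take a).sum = wsum row a (b - a) := by
  have := sum_take_add row a (b - a) (by omega)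
  rw [show a + (b - a) = b by omega] at this
  rw [this]; ring

lemma mapSlice {β : Type} (img : List (List Int)) (g : List Int → β) (a l : Nat)
    (h : a + l ≤ img.length) :
    ((img.drop a).take l).map g = (List.range l).map (fun k => g (img.getD (a + k) [])) := by
  apply List.ext_getElem
  · simp; omega
  · intro i h1 h2
    have hi : i < l := by simpa using h2
    simp only [List.getElem_map, List.getElem_take, List.getElem_drop, List.getElem_range]
    congr 1
    rw [List.getD_eq_getElem _ [] (by omega)]

theorem bAux_eq_alt (img : List (List Int)) (x : Int) (y : Int)
    (hpre : Pre_smoothen img x y) : bAux img x y = smoothen_alt img x y := by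
  obtain ⟨hne, hn1, hx1, hx2, hy1, hy2, hrag⟩ := hpre
  have hm1 : 1 ≤ (img.length : Int) := by
    have := List.length_pos_iff.mpr hne; omega
  have hn0 : PySem.List.pyGetD img 0 ([] : List Int) = img.getD 0 [] := by
    simpa using PySem.List.pyGetD_of_nonneg img ([] : List Int) (by omega)
  unfold bAux smoothen_alt
  simp only [hn0]
  set n : Int := ((img.getD 0 []).length : Int) with hn
  set m : Int := (img.length : Int) with hm
  set x0 : Int := max 0 (x - 1) with hx0
  set x1 : Int := min m (x + 2) with hx1d
  set y0 : Int := max 0 (y - 1) with hy0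
  set y1 : Int := min n (y + 2) with hy1d
  have hx01 : 0 ≤ x0 ∧ x0 ≤ x1 ∧ x1 ≤ m := by constructor; omega; constructor <;> omega
  have hy01 : 0 ≤ y0 ∧ y0 ≤ y1 ∧ y1 ≤ n := by constructor; omega; constructor <;> omega
  -- divisors agree
  rw [show max 0 (x1 - x0) = x1 - x0 by omega, show max 0 (y1 - y0) = y1 - y0 by omega]
  -- totals agree
  congr 1
  rw [PySem.List.slice_of_nonneg img (by omega) (by omega) (by omega) (by omega)]
  rw [PySem.List.foldl_add, zero_add]
  rw [mapSlice img _ x0.toNat (x1.toNat - x0.toNat) (by omega)]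
  rw [outer_eq img x0 x1 y0 y1 (by omega), show (x1 - x0).toNat = x1.toNat - x0.toNat by omega]
  refine congrArg List.sum (List.map_congr_left ?_)
  intro k hk
  rw [List.mem_range] at hk
  -- the row at index x0.toNat + k lies in the window, so Pre_'s ragged condition applies
  have hidx : x0.toNat + k < img.length := by omega
  have hlen : y1 ≤ ((img.getD (x0.toNat + k) []).length : Int) := by
    have := hrag (x0.toNat + k) (List.mem_range.mpr hidx) (by constructor <;> (push_cast; omega))
    omega
  set row := img.getD (x0.toNat + k) [] with hrow
  rw [inner_eq row y0 y1 (by omega)]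
  rw [show y1 = ((y1.toNat : Nat) : Int) by omega, show y0 = ((y0.toNat : Nat) : Int) by omega]
  rw [preGet row y1.toNat (by omega), preGet row y0.toNat (by omega)]
  rw [rowWindow row y0.toNat y1.toNat (by omega) (by omega)]
  congr 1
  omega

-- ===== VERDICT (by name: the statement is the Claim_ definition above) =====
theorem smoothen_spec : Claim_equal_smoothen := by
  intro img x y _ hpre
  unfold Spec_smoothen
  rw [smoothen_eq_bAux img x y hpre, bAux_eq_alt img x y hpre]
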